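-- pv_equiv track=rewrite | github.com/mugglim/kakao-coding-test | 2020-kakao-blind-recruitment/Q1.문자열-압축.py | parse
-- ===== SOURCE A (Python) =====
-- def parse(s, window_size):
--     n = len(s)
--     res = []
--     word_info = [1, s[:window_size]]
--     l = window_size
--
--     def add_word():
--         word = str(word_info[0]) + word_info[1] if word_info[0] > 1 else word_info[1]
--         res.append(word)
--
--
--     while l < n:
--         new_word = s[l:l+window_size]
--
--         if word_info[1] == new_word:
--             word_info[0] += 1
--         else:
--             add_word();
--             word_info = [1, s[l:l+window_size]]
--
--         l += window_size
--
--
--     # remain word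
--     add_word();
--
--     return len(''.join(res))
-- ===== SOURCE B (Python) =====
-- def parse(s, window_size):
--     chunks = [s[i:i + window_size] for i in range(0, len(s), window_size)]
--     if not chunks:
--         return 0
--     cuts = [i for i, (prev, cur) in enumerate(zip(chunks, chunks[1:]), 1) if prev != cur]
--     bounds = [0] + cuts + [len(chunks)]
--     return sum(len(chunks[a]) + (len(str(b - a)) if b - a > 1 else 0)
--                for a, b in zip(bounds, bounds[1:]))
-- ===== Notes on version B (the rewrite author's own statement) =====
-- stated objective: alternative
-- what changed: B works in stages with no run-length state at all: it slices the chunk list, builds the list of boundary indices where adjacent chunks differ (enumerate over zip(chunks, chunks[1:])), brackets it with 0 and len(chunks), and sums len(chunks[a])+len(str(b-a)) over adjacent boundary pairs; A makes one mutable-state pass building each compressed piece as a string, joins them and measures the result.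
-- outside the precondition, e.g. on parse('', 0): A returns 0, B raises ValueError
import Mathlib
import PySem

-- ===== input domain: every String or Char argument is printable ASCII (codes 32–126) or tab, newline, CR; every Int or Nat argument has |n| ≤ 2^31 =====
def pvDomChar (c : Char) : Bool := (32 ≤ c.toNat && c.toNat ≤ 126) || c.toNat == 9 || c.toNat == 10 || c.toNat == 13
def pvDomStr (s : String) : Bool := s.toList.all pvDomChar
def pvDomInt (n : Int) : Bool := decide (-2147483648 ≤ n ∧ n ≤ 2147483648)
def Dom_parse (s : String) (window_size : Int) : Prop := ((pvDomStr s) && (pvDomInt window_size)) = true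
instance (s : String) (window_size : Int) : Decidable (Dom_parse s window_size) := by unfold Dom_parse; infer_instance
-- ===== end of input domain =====

-- B stages the work with no run-length state: chunk list, then the list of boundary indices
-- where adjacent chunks differ, then a sum of len(chunk)+len(str(count)) over adjacent boundary
-- pairs; A makes one mutable-state pass building and joining the compressed string.
-- Objective: alternative decomposition, same cost.

-- ===== PORT A =====
-- add_word(): append the current run's compressed piece to res
def pvAddWord (count : Int) (cur : List Char) (res : List (List Char)) : List (List Char) :=
  res ++ [if count > 1 then PySem.Int.toChars count ++ cur else cur]

-- the while loop, run on a fuel counter that merely totalizes it (fuel is always sufficient on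
-- Pre_parse inputs; when ws ≤ 0 and l < n the Python loop never terminates — outside Pre_parse)
def pvALoop (sl : List Char) (ws n : Int) : Nat → Int → Int → List Char → List (List Char) → List (List Char)
  | fuel + 1, l, count, cur, res =>
      if l < n then
        let nw := PySem.List.slice sl (some l) (some (l + ws))
        if cur = nw then pvALoop sl ws n fuel (l + ws) (count + 1) cur res
        else pvALoop sl ws n fuel (l + ws) 1 nw (pvAddWord count cur res)
      else pvAddWord count cur res
  | 0, _, count, cur, res => pvAddWord count cur res

def parse (s : String) (window_size : Int) : Int :=
  let sl := s.toList
  let n := PySem.List.len sl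
  let res := pvALoop sl window_size n ((n - window_size).toNat + 1) window_size 1
    (PySem.List.slice sl none (some window_size)) []
  PySem.List.len res.flatten      -- len(''.join(res))

-- ===== PORT B =====
-- chunks = [s[i:i+window_size] for i in range(0, len(s), window_size)]
def pvChunks (sl : List Char) (ws : Int) : List (List Char) :=
  (PySem.List.pyRange 0 (PySem.List.len sl) ws).map
    (fun i => PySem.List.slice sl (some i) (some (i + ws)))

-- cuts = [i for i, (prev, cur) in enumerate(zip(chunks, chunks[1:]), 1) if prev != cur]
def pvCuts (chunks : List (List Char)) : List Int :=
  (PySem.List.enumerate (chunks.zip (PySem.List.slice chunks (some 1) none)) 1).filterMap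
    (fun p => if p.2.1 ≠ p.2.2 then some p.1 else none)

-- sum(len(chunks[a]) + (len(str(b-a)) if b-a > 1 else 0) for a, b in zip(bounds, bounds[1:]))
-- chunks[a] is ported as pyGetD with default []: every a produced by Source B is a valid index,
-- so the default is never used there.
def pvBSum (chunks : List (List Char)) (bounds : List Int) : Int :=
  ((bounds.zip (PySem.List.slice bounds (some 1) none)).map
    (fun p => PySem.List.len (PySem.List.pyGetD chunks p.1 []) +
      (if p.2 - p.1 > 1 then PySem.List.len (PySem.Int.toChars (p.2 - p.1)) else 0))).sum

def parse_alt (s : String) (window_size : Int) : Int :=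
  let chunks := pvChunks s.toList window_size
  if chunks.isEmpty then 0
  else pvBSum chunks ([0] ++ pvCuts chunks ++ [PySem.List.len chunks])

-- ===== PRECONDITION & SPEC =====
-- Pre_ excludes window_size ≤ 0: for nonempty s the Python A loops forever there (l steps by a
-- non-positive amount), and on the one remaining corner ("", 0) A returns 0 by accident while
-- B's range(0, 0, 0) raises ValueError.
def Pre_parse (s : String) (window_size : Int) : Prop := 1 ≤ window_size
instance (s : String) (window_size : Int) : Decidable (Pre_parse s window_size) := by
  unfold Pre_parse; infer_instance

def pvWitness_parse : String × Int := ("aabbaccc", 1)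

def Spec_parse (s : String) (window_size : Int) (out : Int) : Prop := out = parse_alt s window_size
instance (s : String) (window_size : Int) (out : Int) : Decidable (Spec_parse s window_size out) := by
  unfold Spec_parse; infer_instance

-- ===== CLAIM (what is proved, stated in full; the proofs are below) =====
def Claim_equal_parse : Prop := ∀ (s : String) (window_size : Int),
  Dom_parse s window_size → Pre_parse s window_size → Spec_parse s window_size (parse s window_size)

-- ===== LEMMAS AND PROOFS =====

-- length of one compressed piece
def pvWordLen (count : Int) (cur : List Char) : Int :=
  (cur.length : Int) + (if count > 1 then ((PySem.Int.toChars count).length : Int) else 0)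

-- compressed length of a run in progress (count copies of cur seen) followed by the chunks 'rest'
def pvEncLen : Int → List Char → List (List Char) → Int
  | count, cur, [] => pvWordLen count cur
  | count, cur, nw :: rest =>
      if cur = nw then pvEncLen (count + 1) cur rest
      else pvWordLen count cur + pvEncLen 1 nw rest

-- compressed length of a chunk list, run by run
def pvRunLen : List (List Char) → Int
  | [] => 0
  | c :: rest =>
      pvWordLen (1 + ((rest.takeWhile (fun x => x = c)).length : Int)) c +
        pvRunLen (rest.dropWhile (fun x => x = c))
termination_by l => l.length
decreasing_by
  have := List.length_dropWhile_le (fun x => decide (x = c)) rest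
  simp only [List.length_cons]
  omega

theorem pvAddWord_flatten (count : Int) (cur : List Char) (res : List (List Char)) :
    (((pvAddWord count cur res).flatten.length : Int)) = (res.flatten.length : Int) + pvWordLen count cur := by
  simp only [pvAddWord, pvWordLen]
  split_ifs <;> simp <;> push_cast <;> ring

-- one cons step of range(a, b, s) for positive s
theorem pvRange_pos_cons (a b s : Int) (hs : 0 < s) (hab : a < b) :
    PySem.List.pyRange a b s = a :: PySem.List.pyRange (a + s) b s := by
  rw [PySem.List.pyRange_of_pos a b hs, PySem.List.pyRange_of_pos (a + s) b hs, if_pos hab]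
  have hq : ((b - a + s - 1) / s).toNat
      = (if a + s < b then ((b - (a + s) + s - 1) / s).toNat else 0) + 1 := by
    by_cases hc : a + s < b
    · rw [if_pos hc]
      have h1 : b - a + s - 1 = (b - (a + s) + s - 1) + 1 * s := by ring
      rw [h1, Int.add_mul_ediv_right _ _ (by omega : s ≠ 0)]
      have h2 : 0 ≤ (b - (a + s) + s - 1) / s := Int.ediv_nonneg (by omega) (by omega)
      omega
    · rw [if_neg hc]
      have h1 : b - a + s - 1 = (b - a - 1) + 1 * s := by ring
      rw [h1, Int.add_mul_ediv_right _ _ (by omega : s ≠ 0)]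
      have h2 : (b - a - 1) / s = 0 := Int.ediv_eq_zero_of_lt (by omega) (by omega)
      omega
  rw [hq, List.range_succ_eq_map]
  simp only [List.map_cons, Nat.cast_zero, mul_zero, add_zero, List.map_map]
  congr 1
  apply List.map_congr_left
  intro k _
  simp only [Function.comp_apply]
  push_cast
  ring

theorem pvRange_pos_nil (a b s : Int) (hs : 0 < s) (hab : b ≤ a) :
    PySem.List.pyRange a b s = [] := by
  rw [PySem.List.pyRange_of_pos a b hs]
  simp [if_neg (by omega : ¬ a < b)]

-- A's while loop computes pvEncLen over the remaining chunk list
theorem pvALoop_flatten (sl : List Char) (ws : Int) (hws : 1 ≤ ws) :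
    ∀ (fuel : Nat) (l count : Int) (cur : List Char) (res : List (List Char)),
      ((sl.length : Int) - l).toNat < fuel →
      (((pvALoop sl ws (sl.length : Int) fuel l count cur res).flatten.length : Int)) =
        (res.flatten.length : Int) +
          pvEncLen count cur
            ((PySem.List.pyRange l (sl.length : Int) ws).map
              (fun i => PySem.List.slice sl (some i) (some (i + ws)))) := by
  intro fuel
  induction fuel with
  | zero => intro l count cur res hk; omega
  | succ fuel ih =>
    intro l count cur res hk
    by_cases hl : l < (sl.length : Int)
    · rw [pvALoop, if_pos hl]
      rw [pvRange_pos_cons l _ ws (by omega) hl]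
      simp only [List.map_cons, pvEncLen]
      by_cases hc : cur = PySem.List.slice sl (some l) (some (l + ws))
      · rw [if_pos hc, if_pos hc]
        exact ih (l + ws) (count + 1) cur res (by omega)
      · rw [if_neg hc, if_neg hc]
        rw [ih (l + ws) 1 _ (pvAddWord count cur res) (by omega)]
        rw [pvAddWord_flatten count cur res]
        ring
    · rw [pvALoop, if_neg hl]
      rw [pvRange_pos_nil l _ ws (by omega) (by omega)]
      simp only [List.map_nil, pvEncLen]
      exact pvAddWord_flatten count cur res

-- pvEncLen absorbs the take/dropWhile split of the current run
theorem pvEncLen_eq_run :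
    ∀ (rest : List (List Char)) (count : Int) (cur : List Char),
      pvEncLen count cur rest =
        pvWordLen (count + ((rest.takeWhile (fun x => x = cur)).length : Int)) cur +
          pvRunLen (rest.dropWhile (fun x => x = cur)) := by
  intro rest
  induction rest with
  | nil =>
    intro count cur
    simp [pvEncLen, pvRunLen]
  | cons nw rest ih =>
    intro count cur
    simp only [pvEncLen]
    by_cases hc : cur = nw
    · subst hc
      rw [if_pos rfl, ih (count + 1) cur]
      simp only [List.takeWhile_cons, List.dropWhile_cons, decide_true, if_true, List.length_cons]
      congr 2
      all_goals (push_cast; ring)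
    · rw [if_neg hc]
      have h1 : (decide (nw = cur)) = false := by
        simp only [decide_eq_false_iff_not]
        exact fun h => hc h.symm
      simp only [List.takeWhile_cons, List.dropWhile_cons, h1, Bool.false_eq_true, if_false,
        List.length_nil, Nat.cast_zero, add_zero]
      rw [pvRunLen, ih 1 nw]

theorem pvRunLen_cons (c : List Char) (rest : List (List Char)) :
    pvRunLen (c :: rest) = pvEncLen 1 c rest := by
  rw [pvEncLen_eq_run rest 1 c, pvRunLen]

-- ---- B-side lemmas ----

-- shifting the enumeration start shifts every produced index
theorem pvEnumFM_shift (L : List ((List Char) × (List Char))) :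
    ∀ s t : Int,
      (PySem.List.enumerate L s).filterMap (fun p => if p.2.1 ≠ p.2.2 then some p.1 else none)
        = ((PySem.List.enumerate L t).filterMap
            (fun p => if p.2.1 ≠ p.2.2 then some p.1 else none)).map (· + (s - t)) := by
  induction L with
  | nil => intro s t; simp [PySem.List.enumerate_nil]
  | cons x L ih =>
    intro s t
    rw [PySem.List.enumerate_cons, PySem.List.enumerate_cons]
    simp only [List.filterMap_cons]
    by_cases hx : x.1 ≠ x.2
    · rw [if_pos hx, if_pos hx, List.map_cons, ih (s + 1) (t + 1)]
      have h1 : t + (s - t) = s := by ring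
      have h2 : s + 1 - (t + 1) = s - t := by ring
      rw [h1, h2]
    · rw [if_neg hx, if_neg hx, ih (s + 1) (t + 1)]
      have h2 : s + 1 - (t + 1) = s - t := by ring
      rw [h2]

-- structural recurrence for the boundary list
theorem pvCuts_cons (a b : List Char) (t : List (List Char)) :
    pvCuts (a :: b :: t) = (if a ≠ b then [(1 : Int)] else []) ++ (pvCuts (b :: t)).map (· + 1) := by
  unfold pvCuts
  rw [PySem.List.slice_from_one, PySem.List.slice_from_one]
  simp only [List.tail_cons, List.zip_cons_cons, PySem.List.enumerate_cons, List.filterMap_cons]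
  rw [pvEnumFM_shift ((b :: t).zip t) (1+1) 1]
  split_ifs with hx
  · norm_num
  · norm_num

theorem pvCuts_single (a : List Char) : pvCuts [a] = [] := by
  unfold pvCuts
  rw [PySem.List.slice_from_one]
  simp [PySem.List.enumerate_nil]

-- every boundary index is positive
theorem pvCuts_pos : ∀ (l : List (List Char)), ∀ x ∈ pvCuts l, 1 ≤ x := by
  intro l
  induction l with
  | nil => intro x hx; simp [pvCuts, PySem.List.slice_from_one, PySem.List.enumerate_nil] at hx
  | cons a rest ih =>
    intro x hx
    cases rest with
    | nil => rw [pvCuts_single] at hx; simp at hx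
    | cons b t =>
      rw [pvCuts_cons] at hx
      rcases List.mem_append.1 hx with h | h
      · split_ifs at h <;> simp at h; omega
      · rcases List.mem_map.1 h with ⟨y, hy, rfl⟩
        have := ih y hy
        omega

-- the boundary list of c :: rest is: nothing if the whole list is one run, otherwise the end of
-- the first run followed by the shifted boundary list of the remaining runs
theorem pvCuts_run : ∀ (rest : List (List Char)) (c : List Char),
    pvCuts (c :: rest) =
      (if rest.dropWhile (fun x => x = c) = [] then []
       else (((rest.takeWhile (fun x => x = c)).length : Int) + 1) ::
            (pvCuts (rest.dropWhile (fun x => x = c))).map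
              (· + (((rest.takeWhile (fun x => x = c)).length : Int) + 1))) := by
  intro rest
  induction rest with
  | nil => intro c; simp [pvCuts_single]
  | cons b t ih =>
    intro c
    by_cases hc : c = b
    · subst hc
      rw [pvCuts_cons, if_neg (by simp), List.nil_append, ih c]
      simp only [List.takeWhile_cons, List.dropWhile_cons, decide_true, if_true, List.length_cons]
      by_cases hd : t.dropWhile (fun x => x = c) = []
      · rw [if_pos hd, if_pos hd]
        simp
      · rw [if_neg hd, if_neg hd]
        simp only [List.map_cons, List.map_map]
        refine congrArg₂ List.cons (by push_cast; ring) ?_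
        apply List.map_congr_left
        intro y _
        simp only [Function.comp_apply]
        push_cast; ring
    · rw [pvCuts_cons, if_pos (by exact fun h => hc h)]
      have hb : (decide (b = c)) = false := by
        simp only [decide_eq_false_iff_not]; exact fun h => hc h.symm
      simp only [List.takeWhile_cons, List.dropWhile_cons, hb, Bool.false_eq_true, if_false,
        List.length_nil, Nat.cast_zero, zero_add]
      rw [if_neg (by simp)]
      simp

-- pyGetD past a prefix of known length looks up in the suffix
theorem pvGetD_shift (pre suf : List (List Char)) (a : Int) (ha : 0 ≤ a) :
    PySem.List.pyGetD (pre ++ suf) (a + (pre.length : Int)) [] = PySem.List.pyGetD suf a [] := by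
  obtain ⟨j, rfl⟩ : ∃ j : Nat, a = (j : Int) := ⟨a.toNat, by omega⟩
  have h1 : (j : Int) + (pre.length : Int) = ((j + pre.length : Nat) : Int) := by push_cast; ring
  rw [h1, PySem.List.pyGetD_natCast, PySem.List.pyGetD_natCast]
  simp only [List.getD_eq_getElem?_getD]
  rw [List.getElem?_append_right (by omega)]
  have hj : j + pre.length - pre.length = j := by omega
  rw [hj]

-- the pair sum over bounds(ch) computes the run-by-run compressed length
theorem pvBSum_runs :
    ∀ (n : Nat) (ch : List (List Char)), ch.length ≤ n → ch ≠ [] →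
      pvBSum ch (0 :: pvCuts ch ++ [(ch.length : Int)]) = pvRunLen ch := by
  intro n
  induction n with
  | zero =>
    intro ch hn hne
    cases ch with
    | nil => exact absurd rfl hne
    | cons a t => simp at hn
  | succ n ih =>
    intro ch hn hne
    cases ch with
    | nil => exact absurd rfl hne
    | cons c rest =>
      rw [pvCuts_run rest c]
      set tw := rest.takeWhile (fun x => x = c) with htw
      set rest' := rest.dropWhile (fun x => x = c) with hrest'
      have hsplit : rest = tw ++ rest' := (List.takeWhile_append_dropWhile).symm
      have hlen : (c :: rest).length = 1 + tw.length + rest'.length := by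
        rw [hsplit]; simp; omega
      by_cases hd : rest' = []
      · -- the whole list is a single run
        rw [if_pos hd]
        unfold pvBSum
        rw [PySem.List.slice_from_one]
        simp only [List.cons_append, List.nil_append, List.tail_cons, List.zip_cons_cons,
          List.zip_nil_right, List.map_cons, List.map_nil, List.sum_cons, List.sum_nil]
        rw [pvRunLen, ← htw, ← hrest', hd, pvRunLen]
        have hget : PySem.List.pyGetD (c :: rest) 0 [] = c := by
          have := pvGetD_shift [] (c :: rest) 0 le_rfl
          simpa using this
        rw [hget]
        have hl2 : (c :: rest).length = 1 + tw.length := by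
          rw [hlen, hd]; simp
        have hm : ((c :: rest).length : Int) - 0 = 1 + (tw.length : Int) := by
          rw [hl2]; push_cast; ring
        rw [hm]
        simp only [pvWordLen, PySem.List.len_eq]
      · rw [if_neg hd]
        have hm : ((c :: rest).length : Int) = (rest'.length : Int) + ((tw.length : Int) + 1) := by
          rw [hlen]; push_cast; ring
        -- rewrite bounds as the shifted bounds of rest'
        have hbounds :
            (((tw.length : Int) + 1) :: (pvCuts rest').map (· + ((tw.length : Int) + 1))) ++ [((c :: rest).length : Int)]
              = (0 :: pvCuts rest' ++ [(rest'.length : Int)]).map (· + ((tw.length : Int) + 1)) := by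
          rw [hm]
          simp only [List.cons_append, List.nil_append, List.map_cons, List.map_append,
            List.map_nil, zero_add]
        unfold pvBSum
        rw [PySem.List.slice_from_one]
        simp only [List.cons_append, List.tail_cons]
        rw [← List.cons_append, hbounds]
        have hhead : (0 :: pvCuts rest' ++ [(rest'.length : Int)]).map (· + ((tw.length : Int) + 1))
            = ((tw.length : Int) + 1) ::
                ((pvCuts rest' ++ [(rest'.length : Int)]).map (· + ((tw.length : Int) + 1))) := by
          simp
        rw [hhead, List.zip_cons_cons, ← hhead]
        have hzip : ((0 :: pvCuts rest' ++ [(rest'.length : Int)]).map (· + ((tw.length : Int) + 1))).zip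
              ((pvCuts rest' ++ [(rest'.length : Int)]).map (· + ((tw.length : Int) + 1)))
            = ((0 :: pvCuts rest' ++ [(rest'.length : Int)]).zip (pvCuts rest' ++ [(rest'.length : Int)])).map
                (Prod.map (· + ((tw.length : Int) + 1)) (· + ((tw.length : Int) + 1))) := by
          rw [List.zip_map]
        rw [hzip]
        simp only [List.map_cons, List.sum_cons, List.map_map]
        -- head term looks up chunk 0
        have hget : PySem.List.pyGetD (c :: rest) 0 [] = c := by
          have := pvGetD_shift [] (c :: rest) 0 le_rfl
          simpa using this
        rw [hget]
        -- the shifted terms look up in rest'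
        have hcongr :
            ((0 :: pvCuts rest' ++ [(rest'.length : Int)]).zip (pvCuts rest' ++ [(rest'.length : Int)])).map
              ((fun p : Int × Int => PySem.List.len (PySem.List.pyGetD (c :: rest) p.1 []) +
                  (if p.2 - p.1 > 1 then PySem.List.len (PySem.Int.toChars (p.2 - p.1)) else 0))
                ∘ Prod.map (· + ((tw.length : Int) + 1)) (· + ((tw.length : Int) + 1)))
            = ((0 :: pvCuts rest' ++ [(rest'.length : Int)]).zip (pvCuts rest' ++ [(rest'.length : Int)])).map
              (fun p : Int × Int => PySem.List.len (PySem.List.pyGetD rest' p.1 []) +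
                  (if p.2 - p.1 > 1 then PySem.List.len (PySem.Int.toChars (p.2 - p.1)) else 0)) := by
          apply List.map_congr_left
          intro p hp
          have hp1 : p.1 ∈ 0 :: pvCuts rest' ++ [(rest'.length : Int)] := (List.of_mem_zip hp).1
          have hp1n : 0 ≤ p.1 := by
            rw [List.cons_append] at hp1
            rcases List.mem_cons.1 hp1 with h0 | h0
            · omega
            · rcases List.mem_append.1 h0 with h1 | h1
              · have := pvCuts_pos rest' p.1 h1; omega
              · have : p.1 = (rest'.length : Int) := by simpa using h1
                rw [this]; positivity
          have hpre : (c :: rest) = (c :: tw) ++ rest' := by rw [hsplit]; simp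
          have hklen : ((c :: tw).length : Int) = (tw.length : Int) + 1 := by
            push_cast [List.length_cons]; ring
          have hsh := pvGetD_shift (c :: tw) rest' p.1 hp1n
          rw [hklen] at hsh
          simp only [Function.comp_apply, Prod.map_fst, Prod.map_snd]
          rw [hpre, hsh]
          have harg : p.2 + ((tw.length : Int) + 1) - (p.1 + ((tw.length : Int) + 1)) = p.2 - p.1 := by
            ring
          rw [harg]
        rw [hcongr]
        -- tail sum = pvBSum rest' bounds(rest') = pvRunLen rest'
        have hIH : pvBSum rest' (0 :: pvCuts rest' ++ [(rest'.length : Int)]) = pvRunLen rest' := by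
          apply ih rest' _ hd
          have h1 : rest'.length ≤ rest.length := by
            rw [hrest']; exact List.length_dropWhile_le _ rest
          simp only [List.length_cons] at hn
          omega
        have hBS : pvBSum rest' (0 :: pvCuts rest' ++ [(rest'.length : Int)])
            = (((0 :: pvCuts rest' ++ [(rest'.length : Int)]).zip (pvCuts rest' ++ [(rest'.length : Int)])).map
              (fun p : Int × Int => PySem.List.len (PySem.List.pyGetD rest' p.1 []) +
                  (if p.2 - p.1 > 1 then PySem.List.len (PySem.Int.toChars (p.2 - p.1)) else 0))).sum := by
          unfold pvBSum
          rw [PySem.List.slice_from_one]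
          simp
        rw [← hBS, hIH]
        -- assemble with the head run of pvRunLen
        rw [pvRunLen, ← htw, ← hrest']
        have h1 : ((tw.length : Int) + 1) - 0 = 1 + (tw.length : Int) := by ring
        rw [h1]
        simp only [pvWordLen, PySem.List.len_eq]

-- B computes pvRunLen of the chunk list
theorem parse_alt_eq_runs (s : String) (ws : Int) :
    parse_alt s ws = pvRunLen (pvChunks s.toList ws) := by
  unfold parse_alt
  by_cases h : pvChunks s.toList ws = []
  · rw [h]; simp [pvRunLen]
  · rw [if_neg (by simpa [List.isEmpty_iff] using h)]
    simp only [PySem.List.len_eq, List.singleton_append]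
    exact pvBSum_runs (pvChunks s.toList ws).length _ le_rfl h

-- ===== VERDICT (by name: the statement is the Claim_ definition above) =====
theorem parse_spec : Claim_equal_parse := by
  intro s ws _ hpre
  unfold Pre_parse at hpre
  unfold Spec_parse
  rw [parse_alt_eq_runs]
  unfold parse pvChunks
  simp only [PySem.List.len_eq]
  by_cases h0 : s.toList.length = 0
  · have hsl : s.toList = [] := List.eq_nil_of_length_eq_zero h0
    rw [hsl]
    rw [pvRange_pos_nil 0 _ ws (by omega) (by simp)]
    simp only [List.map_nil]
    rw [pvALoop, if_neg (show ¬ ((ws : Int) < ((([] : List Char).length : Nat) : Int)) by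
      simp only [List.length_nil, Nat.cast_zero]; omega)]
    simp [pvAddWord, pvRunLen, PySem.List.slice]
  · have hpos : (0 : Int) < (s.toList.length : Int) := by omega
    rw [pvALoop_flatten s.toList ws hpre _ ws 1 _ [] (by omega)]
    rw [pvRange_pos_cons 0 _ ws (by omega) hpos]
    simp only [List.map_cons, zero_add]
    rw [pvRunLen_cons]
    simp [PySem.List.slice_zero_start]
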